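-- pv_equiv track=rewrite | github.com/FaraiMajor/python_projects | leetcode/count_profitable_intervals.py | count_profitable_intervals
-- ===== SOURCE A (Python) =====
-- def count_profitable_intervals(prices, k):
--     count = 0
--     streak = 1
--     for i in range(1, len(prices)):
--         if prices[i] > prices[i-1]:
--             streak += 1
--             if streak == k:
--                 count += 1
--                 streak = 1
--         else:
--             streak = 1
--     return count
-- ===== SOURCE B (Python) =====
-- def count_profitable_intervals(prices, k):
--     if k < 2 or not prices:
--         return 0
--     n = len(prices)
--     cuts = [0] + [i for i in range(1, n) if prices[i] <= prices[i-1]] + [n]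
--     return sum((b - a - 1) // (k - 1) for a, b in zip(cuts, cuts[1:]))
-- ===== Notes on version B (the rewrite author's own statement) =====
-- stated objective: alternative
-- what changed: B replaces A's stateful increment-and-reset streak counter with a boundary formulation: it collects all cut positions where the sequence fails to rise, then sums (gap-1)//(k-1) over adjacent boundary pairs, guarding k<2 (and the empty list) by returning 0.
import Mathlib
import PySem

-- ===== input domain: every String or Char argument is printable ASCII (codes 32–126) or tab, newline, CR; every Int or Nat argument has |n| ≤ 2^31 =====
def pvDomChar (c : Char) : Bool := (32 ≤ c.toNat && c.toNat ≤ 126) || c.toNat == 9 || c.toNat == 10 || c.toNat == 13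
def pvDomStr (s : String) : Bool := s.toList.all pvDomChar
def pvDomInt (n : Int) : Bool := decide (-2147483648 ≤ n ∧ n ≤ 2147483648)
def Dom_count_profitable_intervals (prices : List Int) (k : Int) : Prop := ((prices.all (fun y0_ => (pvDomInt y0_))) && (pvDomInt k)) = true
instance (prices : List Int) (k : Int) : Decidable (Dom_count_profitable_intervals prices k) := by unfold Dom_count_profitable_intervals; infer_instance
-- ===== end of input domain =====

-- B collects the cut positions where the sequence fails to rise and sums (gap-1)//(k-1)
-- over adjacent boundary pairs, instead of A's increment-and-reset streak counter;
-- alternative decomposition, same O(n) cost.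


-- ===== PORT A =====
-- for i in range(1, len(prices)): compare prices[i] with prices[i-1]; state = (count, streak).
-- Indices i-1, i are always in range, so pyGetD's default 0 is never used.
def count_profitable_intervals (prices : List Int) (k : Int) : Int :=
  ((PySem.List.pyRange 1 (prices.length : Int) 1).foldl
    (fun (cs : Int × Int) (i : Int) =>
      if PySem.List.pyGetD prices i 0 > PySem.List.pyGetD prices (i - 1) 0 then
        let streak := cs.2 + 1
        if streak = k then (cs.1 + 1, 1) else (cs.1, streak)
      else (cs.1, 1))
    ((0 : Int), (1 : Int))).1

-- ===== PORT B =====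
-- Source B: cuts = [0] + [i for i in range(1, n) if prices[i] <= prices[i-1]] + [n];
-- return sum((b - a - 1) // (k - 1) for a, b in zip(cuts, cuts[1:])).
-- Indices i-1, i are always in range, so pyGetD's default 0 is never used.
def count_profitable_intervals_alt (prices : List Int) (k : Int) : Int :=
  if k < 2 ∨ prices = [] then 0
  else
    let n : Int := prices.length
    let cuts : List Int :=
      (0 : Int) :: ((PySem.List.pyRange 1 n 1).filter
        (fun i => decide (PySem.List.pyGetD prices i 0 ≤ PySem.List.pyGetD prices (i - 1) 0))) ++ [n]
    ((cuts.zip (cuts.drop 1)).map (fun ab => PySem.Int.floordiv (ab.2 - ab.1 - 1) (k - 1))).sum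

-- ===== PRECONDITION & SPEC =====
def Spec_count_profitable_intervals (prices : List Int) (k : Int) (out : Int) : Prop := out = count_profitable_intervals_alt prices k
instance (prices : List Int) (k : Int) (out : Int) : Decidable (Spec_count_profitable_intervals prices k out) := by unfold Spec_count_profitable_intervals; infer_instance

-- ===== CLAIM (what is proved, stated in full; the proofs are below) =====
def Claim_equal_count_profitable_intervals : Prop := ∀ (prices : List Int) (k : Int), Dom_count_profitable_intervals prices k → Spec_count_profitable_intervals prices k (count_profitable_intervals prices k)

-- ===== LEMMAS AND PROOFS =====

-- A's loop body as a function of (state, previous element, current element)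
def cpiStepA (k : Int) (cs : Int × Int) (prev cur : Int) : Int × Int :=
  if cur > prev then
    let streak := cs.2 + 1
    if streak = k then (cs.1 + 1, 1) else (cs.1, streak)
  else (cs.1, 1)

-- A's loop rephrased as structural recursion over the list, carrying the previous element
def cpiPairA (k : Int) : Int → List Int → (Int × Int) → Int × Int
  | _, [], s => s
  | prev, c :: rest, s => cpiPairA k c rest (cpiStepA k s prev c)

-- intermediate run-by-run form: (total, rises-in-current-run), one floordiv per run end
def cpiRuns (k : Int) : Int → Int → Int → List Int → Int
  | _, total, run, [] => total + PySem.Int.floordiv run (k - 1)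
  | prev, total, run, cur :: rest =>
      if cur > prev then cpiRuns k cur total (run + 1) rest
      else cpiRuns k cur (total + PySem.Int.floordiv run (k - 1)) 0 rest

-- sum of (b - a - 1) // (k-1) over adjacent pairs of the boundary list
def cpiPairSum (k : Int) : List Int → Int
  | a :: b :: rest => PySem.Int.floordiv (b - a - 1) (k - 1) + cpiPairSum k (b :: rest)
  | _ => 0

-- the cut positions of Source B's comprehension, as structural recursion carrying prev and index
def cpiCuts : Int → List Int → Int → List Int
  | _, [], _ => []
  | prev, c :: rest, pos =>
      if c > prev then cpiCuts c rest (pos + 1) else pos :: cpiCuts c rest (pos + 1)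

lemma cpi_idx_bridge (k : Int) : ∀ (xs : List Int) (prev : Int) (s : Int × Int),
    (List.range xs.length).foldl
      (fun cs (j : Nat) => cpiStepA k cs ((prev :: xs).getD j 0) ((prev :: xs).getD (j + 1) 0)) s
    = cpiPairA k prev xs s := by
  intro xs
  induction xs with
  | nil => intro prev s; simp [cpiPairA]
  | cons c rest ih =>
    intro prev s
    simp only [List.length_cons]
    rw [List.range_succ_eq_map]
    simp only [List.foldl_cons, List.foldl_map, List.getD_cons_succ, List.getD_cons_zero]
    exact ih c (cpiStepA k s prev c)

lemma cpi_A_eq_pairA (prices : List Int) (k : Int) :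
    count_profitable_intervals prices k
    = (match prices with
       | [] => ((0 : Int), (1 : Int))
       | p :: rest => cpiPairA k p rest (0, 1)).1 := by
  cases prices with
  | nil =>
    simp [count_profitable_intervals, PySem.List.pyRange_one_eq_nil]
  | cons p rest =>
    unfold count_profitable_intervals
    have hlen : ((p :: rest).length : Int) = (rest.length : Int) + 1 := by
      simp
    rw [hlen, PySem.List.pyRange_one (1) ((rest.length : Int) + 1)]
    have htn : (((rest.length : Int) + 1) - 1).toNat = rest.length := by omega
    rw [htn, List.foldl_map]
    have heq : (fun (cs : Int × Int) (j : Nat) =>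
        if PySem.List.pyGetD (p :: rest) (1 + (j : Int)) 0 > PySem.List.pyGetD (p :: rest) (1 + (j : Int) - 1) 0 then
          let streak := cs.2 + 1
          if streak = k then (cs.1 + 1, 1) else (cs.1, streak)
        else (cs.1, 1))
      = (fun (cs : Int × Int) (j : Nat) => cpiStepA k cs ((p :: rest).getD j 0) ((p :: rest).getD (j + 1) 0)) := by
      funext cs j
      have h1 : 1 + (j : Int) - 1 = ((j : Nat) : Int) := by omega
      have h2 : 1 + (j : Int) = (((j + 1 : Nat)) : Int) := by push_cast; omega
      rw [h1, h2, PySem.List.pyGetD_natCast, PySem.List.pyGetD_natCast, cpiStepA]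
    rw [heq]
    exact congrArg Prod.fst (cpi_idx_bridge k rest p (0, 1))

-- with k < 2 the streak test never fires (streak stays ≥ 1, so streak + 1 ≥ 2 > k)
lemma cpi_small_k (k : Int) (hk : k < 2) : ∀ (xs : List Int) (prev : Int) (s : Int × Int),
    1 ≤ s.2 → (cpiPairA k prev xs s).1 = s.1 := by
  intro xs
  induction xs with
  | nil => intro prev s _; rfl
  | cons c rest ih =>
    intro prev s hs
    show (cpiPairA k c rest (cpiStepA k s prev c)).1 = s.1
    have hne : ¬ (s.2 + 1 = k) := by omega
    unfold cpiStepA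
    by_cases h : c > prev
    · simp only [if_pos h, if_neg hne]
      exact ih c (s.1, s.2 + 1) (by simp; omega)
    · simp only [if_neg h]
      exact ih c (s.1, 1) (by simp)

-- main invariant: A's (count, streak) = (total + run/(k-1), run%(k-1) + 1) for k ≥ 2
lemma cpi_main (k : Int) (hk : 2 ≤ k) : ∀ (xs : List Int) (prev total run : Int), 0 ≤ run →
    (cpiPairA k prev xs (total + run / (k - 1), run % (k - 1) + 1)).1 = cpiRuns k prev total run xs := by
  have hm : 0 < k - 1 := by omega
  intro xs
  induction xs with
  | nil =>
    intro prev total run _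
    show total + run / (k - 1) = total + PySem.Int.floordiv run (k - 1)
    rw [PySem.Int.floordiv_eq_ediv_of_pos hm]
  | cons c rest ih =>
    intro prev total run hrun
    show (cpiPairA k c rest (cpiStepA k (total + run / (k - 1), run % (k - 1) + 1) prev c)).1
        = cpiRuns k prev total run (c :: rest)
    have hdm := Int.emod_add_mul_ediv run (k - 1)
    have hlt : run % (k - 1) < k - 1 := Int.emod_lt_of_pos run hm
    have hge : 0 ≤ run % (k - 1) := Int.emod_nonneg run (by omega)
    unfold cpiStepA cpiRuns
    by_cases hc : c > prev
    · simp only [hc, if_pos]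
      by_cases hkhit : run % (k - 1) + 1 + 1 = k
      · have hq : (run + 1) / (k - 1) = run / (k - 1) + 1 := by
          have : run + 1 = (run / (k - 1) + 1) * (k - 1) := by nlinarith [hdm]
          rw [this, Int.mul_ediv_cancel _ (by omega)]
        have hr : (run + 1) % (k - 1) = 0 := by
          have : run + 1 = (run / (k - 1) + 1) * (k - 1) := by nlinarith [hdm]
          rw [this]; exact Int.mul_emod_left _ _
        simp only [hkhit, if_pos]
        have := ih c total (run + 1) (by omega)
        rw [hq, hr] at this
        simpa [add_assoc] using this
      · have hlt2 : run % (k - 1) + 1 < k - 1 := by omega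
        have hq : (run + 1) / (k - 1) = run / (k - 1) := by
          rw [show run + 1 = (run % (k - 1) + 1) + (k - 1) * (run / (k - 1)) by omega,
              Int.add_mul_ediv_left _ _ (by omega : k - 1 ≠ 0),
              Int.ediv_eq_zero_of_lt (by omega) hlt2, zero_add]
        have hr : (run + 1) % (k - 1) = run % (k - 1) + 1 := by
          rw [show run + 1 = (run % (k - 1) + 1) + (k - 1) * (run / (k - 1)) by omega,
              Int.add_mul_emod_self_left, Int.emod_eq_of_lt (by omega) hlt2]
        simp only [hkhit, if_false]
        have := ih c total (run + 1) (by omega)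
        rw [hq, hr] at this
        exact this
    · simp only [hc, if_false]
      have := ih c (total + PySem.Int.floordiv run (k - 1)) 0 le_rfl
      rw [PySem.Int.floordiv_eq_ediv_of_pos hm] at this ⊢
      simpa using this

-- the filter comprehension of Source B, written over List.range, is cpiCuts
lemma cpi_cut_bridge : ∀ (xs : List Int) (prev pos : Int),
    ((List.range xs.length).filter
        (fun j => decide ((prev :: xs).getD (j + 1) 0 ≤ (prev :: xs).getD j 0))).map
      (fun (j : Nat) => pos + (j : Int))
    = cpiCuts prev xs pos := by
  intro xs
  induction xs with
  | nil => intro prev pos; simp [cpiCuts]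
  | cons c rest ih =>
    intro prev pos
    simp only [List.length_cons]
    rw [List.range_succ_eq_map, List.filter_cons]
    have harith : ((fun (j : Nat) => pos + (j : Int)) ∘ Nat.succ) = (fun (j : Nat) => (pos + 1) + (j : Int)) := by
      funext j
      simp only [Function.comp, Nat.succ_eq_add_one]
      push_cast
      ring
    have hcomp : ((fun (j : Nat) => decide ((prev :: c :: rest).getD (j + 1) 0 ≤ (prev :: c :: rest).getD j 0)) ∘ Nat.succ)
        = (fun (j : Nat) => decide ((c :: rest).getD (j + 1) 0 ≤ (c :: rest).getD j 0)) := by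
      funext j
      simp [Function.comp, Nat.succ_eq_add_one]
    have hcuts_eq : cpiCuts prev (c :: rest) pos
        = if c > prev then cpiCuts c rest (pos + 1) else pos :: cpiCuts c rest (pos + 1) := rfl
    by_cases hc : c > prev
    · rw [if_neg (by simp; omega)]
      rw [List.filter_map, hcomp, List.map_map, harith]
      rw [hcuts_eq, if_pos hc]
      exact ih c (pos + 1)
    · rw [if_pos (by simp; omega)]
      rw [List.map_cons, List.filter_map, hcomp, List.map_map, harith, ih c (pos + 1)]
      rw [hcuts_eq, if_neg hc]
      norm_num

-- the zip/map/sum over adjacent pairs is cpiPairSum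
lemma cpi_zipsum (k : Int) : ∀ (l : List Int),
    ((l.zip (l.drop 1)).map (fun ab => PySem.Int.floordiv (ab.2 - ab.1 - 1) (k - 1))).sum
    = cpiPairSum k l := by
  intro l
  induction l with
  | nil => rfl
  | cons a t ih =>
    cases t with
    | nil => rfl
    | cons b rest =>
      simp only [List.drop_one, List.tail_cons, List.zip_cons_cons, List.map_cons, List.sum_cons]
      have : ((List.zip (b :: rest) rest).map
          (fun ab => PySem.Int.floordiv (ab.2 - ab.1 - 1) (k - 1))).sum = cpiPairSum k (b :: rest) := by
        simpa [List.drop_one] using ih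
      rw [this]; rfl

-- run-by-run accumulation equals the boundary-pair sum
lemma cpi_runs_eq_pairsum (k : Int) : ∀ (xs : List Int) (prev total pos s : Int),
    total + cpiPairSum k (s :: (cpiCuts prev xs pos ++ [pos + (xs.length : Int)]))
    = cpiRuns k prev total (pos - 1 - s) xs := by
  intro xs
  induction xs with
  | nil =>
    intro prev total pos s
    show total + (PySem.Int.floordiv (pos + 0 - s - 1) (k - 1) + 0) = total + PySem.Int.floordiv (pos - 1 - s) (k - 1)
    have : pos + 0 - s - 1 = pos - 1 - s := by ring
    rw [this, add_zero]
  | cons c rest ih =>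
    intro prev total pos s
    have hlen : ((c :: rest).length : Int) = (rest.length : Int) + 1 := by simp
    unfold cpiRuns cpiCuts
    by_cases hc : c > prev
    · simp only [if_pos hc]
      have := ih c total (pos + 1) s
      have hr : pos + 1 - 1 - s = pos - 1 - s + 1 := by ring
      rw [hr] at this
      rw [← this, hlen]
      ring_nf
    · simp only [if_neg hc]
      have := ih c (total + PySem.Int.floordiv (pos - s - 1) (k - 1)) (pos + 1) pos
      have hz : pos + 1 - 1 - pos = 0 := by ring
      rw [hz] at this
      have hrw : pos - 1 - s = pos - s - 1 := by ring
      rw [hrw, ← this, hlen]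
      show total + (PySem.Int.floordiv (pos - s - 1) (k - 1)
            + cpiPairSum k (pos :: (cpiCuts c rest (pos + 1) ++ [pos + ((rest.length : Int) + 1)])))
          = total + PySem.Int.floordiv (pos - s - 1) (k - 1)
            + cpiPairSum k (pos :: (cpiCuts c rest (pos + 1) ++ [pos + 1 + (rest.length : Int)]))
      ring_nf

-- ===== VERDICT (by name: the statement is the Claim_ definition above) =====
theorem count_profitable_intervals_spec : Claim_equal_count_profitable_intervals := by
  intro prices k _
  show count_profitable_intervals prices k = count_profitable_intervals_alt prices k
  rw [cpi_A_eq_pairA]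
  unfold count_profitable_intervals_alt
  by_cases hguard : k < 2 ∨ prices = []
  · rw [if_pos hguard]
    cases prices with
    | nil => rfl
    | cons p rest =>
      rcases hguard with hk | hnil
      · exact cpi_small_k k hk rest p (0, 1) (by norm_num)
      · exact absurd hnil (by simp)
  · rw [if_neg hguard]
    have hk : ¬ k < 2 := fun h => hguard (Or.inl h)
    have hne : prices ≠ [] := fun h => hguard (Or.inr h)
    cases prices with
    | nil => exact absurd rfl hne
    | cons p rest =>
      -- A side: cpiPairA = cpiRuns with total = run = 0
      have hA : (cpiPairA k p rest (0, 1)).1 = cpiRuns k p 0 0 rest := by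
        have := cpi_main k (by omega) rest p 0 0 le_rfl
        have hz : (0 : Int) / (k - 1) = 0 := Int.zero_ediv _
        have hz2 : (0 : Int) % (k - 1) = 0 := Int.zero_emod _
        rw [hz, hz2, add_zero, zero_add] at this
        exact this
      rw [hA]
      -- B side: rewrite the filter comprehension into cpiCuts, the zip sum into cpiPairSum
      rw [cpi_zipsum k]
      have hlen : (((p :: rest).length : Int)) = (rest.length : Int) + 1 := by simp
      rw [hlen, PySem.List.pyRange_one (1) ((rest.length : Int) + 1)]
      have htn : (((rest.length : Int) + 1) - 1).toNat = rest.length := by omega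
      rw [htn, List.filter_map]
      have hcond : ((fun i => decide (PySem.List.pyGetD (p :: rest) i 0 ≤ PySem.List.pyGetD (p :: rest) (i - 1) 0)) ∘ (fun (j : Nat) => 1 + (j : Int)))
          = (fun (j : Nat) => decide ((p :: rest).getD (j + 1) 0 ≤ (p :: rest).getD j 0)) := by
        funext j
        simp only [Function.comp]
        have h2 : 1 + (j : Int) = (((j + 1 : Nat)) : Int) := by push_cast; omega
        have h1 : (((j + 1 : Nat)) : Int) - 1 = ((j : Nat) : Int) := by push_cast; omega
        simp only [h2, h1, PySem.List.pyGetD_natCast]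
      rw [hcond]
      rw [cpi_cut_bridge rest p 1]
      have := cpi_runs_eq_pairsum k rest p 0 1 0
      have hz : (1 : Int) - 1 - 0 = 0 := by ring
      rw [hz] at this
      have hend : (1 : Int) + (rest.length : Int) = (rest.length : Int) + 1 := by ring
      rw [hend] at this
      rw [List.cons_append]
      omega
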